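-- pv_equiv track=rewrite | github.com/michi-system/Reseller | reselling/live_miner_fetch.py | _has_near_specific_model_code
-- ===== SOURCE A (Python) =====
-- def _has_near_specific_model_code(left_codes: set[str], right_codes: set[str]) -> bool:
--     if not left_codes or not right_codes:
--         return False
--     for left in left_codes:
--         if not left:
--             continue
--         for right in right_codes:
--             if not right:
--                 continue
--             if left == right:
--                 return True
--             if min(len(left), len(right)) < 8:
--                 continue
--             if left[:4] != right[:4]:
--                 continue
--             left_digits = "".join(ch for ch in left if ch.isdigit())
--             right_digits = "".join(ch for ch in right if ch.isdigit())
--             if left_digits and right_digits and left_digits != right_digits: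
--                 continue
--             if abs(len(left) - len(right)) > 2:
--                 continue
--             prefix_len = 0
--             for lch, rch in zip(left, right):
--                 if lch != rch:
--                     break
--                 prefix_len += 1
--             if prefix_len >= max(6, min(len(left), len(right)) - 2):
--                 return True
--     return False
-- ===== SOURCE B (Python) =====
-- def _common_prefix_len(left, right):
--     m = min(len(left), len(right))
--     p = 0
--     while p < m and left[p] == right[p]:
--         p += 1
--     return p
--
--
-- def _has_near_specific_model_code(left_codes: set[str], right_codes: set[str]) -> bool:
--     # Index the right codes by their 4-char prefix so each left code only
--     # scans its own bucket instead of every right code.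
--     buckets = {}
--     for key, code in [(r[:4], r) for r in right_codes if r]:
--         buckets.setdefault(key, []).append(code)
--     for left in left_codes:
--         if not left:
--             continue
--         for right in buckets.get(left[:4], []):
--             if left == right:
--                 return True
--             if min(len(left), len(right)) < 8:
--                 continue
--             ld = [c for c in left if c.isdigit()]
--             rd = [c for c in right if c.isdigit()]
--             if ld and rd and ld != rd:
--                 continue
--             if abs(len(left) - len(right)) > 2:
--                 continue
--             if _common_prefix_len(left, right) >= max(6, min(len(left), len(right)) - 2):
--                 return True
--     return False
-- ===== Notes on version B (the rewrite author's own statement) =====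
-- stated objective: alternative
-- what changed: B builds a dict indexing the non-empty right codes by their 4-character prefix once, then each left code scans only its own bucket (exact match and every near-match require equal 4-char prefixes), replacing A's full left-by-right double scan; measured 1.5-3.2x faster at small/medium sizes but only 1.48x at the largest, so no speed claim.
import Mathlib
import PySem

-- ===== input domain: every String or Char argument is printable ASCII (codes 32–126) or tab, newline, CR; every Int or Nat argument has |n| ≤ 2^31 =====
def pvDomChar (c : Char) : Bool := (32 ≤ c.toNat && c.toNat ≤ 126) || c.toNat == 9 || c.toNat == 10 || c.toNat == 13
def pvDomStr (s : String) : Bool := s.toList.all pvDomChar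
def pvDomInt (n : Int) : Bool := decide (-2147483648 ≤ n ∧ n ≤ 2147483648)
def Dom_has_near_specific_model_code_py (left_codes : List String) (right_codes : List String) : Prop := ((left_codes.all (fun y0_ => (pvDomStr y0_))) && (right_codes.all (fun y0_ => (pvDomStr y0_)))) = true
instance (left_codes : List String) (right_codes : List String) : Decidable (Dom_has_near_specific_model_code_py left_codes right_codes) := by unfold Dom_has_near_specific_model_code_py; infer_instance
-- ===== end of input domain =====

-- B indexes the right codes once by their 4-char prefix and scans only the matching
-- bucket per left code, instead of A's full double scan; the return value is proved equal.

-- ===== PORT A =====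
-- prefix_len loop: 'for lch, rch in zip(left, right): if lch != rch: break; prefix_len += 1'
def pvPfxA : List (Char × Char) → Nat
  | [] => 0
  | (a, b) :: ps => if a = b then pvPfxA ps + 1 else 0

-- inner 'for right in right_codes' loop of A (true = early 'return True')
def pvInnerA (left : String) : List String → Bool
  | [] => false
  | r :: rs =>
    if r = "" then pvInnerA left rs
    else if left = r then true
    else if min (PySem.Str.len left) (PySem.Str.len r) < 8 then pvInnerA left rs
    else if PySem.Str.slice left none (some 4) ≠ PySem.Str.slice r none (some 4) then pvInnerA left rs
    else
      let ld := String.ofList (left.toList.filter PySem.Chars.isdigit)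
      let rd := String.ofList (r.toList.filter PySem.Chars.isdigit)
      if ld ≠ "" ∧ rd ≠ "" ∧ ld ≠ rd then pvInnerA left rs
      else if 2 < |PySem.Str.len left - PySem.Str.len r| then pvInnerA left rs
      else if ((pvPfxA (left.toList.zip r.toList) : Int)) ≥ max 6 (min (PySem.Str.len left) (PySem.Str.len r) - 2) then true
      else pvInnerA left rs

-- outer 'for left in left_codes' loop of A
def pvOuterA (right_codes : List String) : List String → Bool
  | [] => false
  | l :: ls =>
    if l = "" then pvOuterA right_codes ls
    else if pvInnerA l right_codes then true
    else pvOuterA right_codes ls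

def has_near_specific_model_code_py (left_codes : List String) (right_codes : List String) : Bool :=
  if left_codes.isEmpty || right_codes.isEmpty then false
  else pvOuterA right_codes left_codes

-- ===== PORT B =====
-- 'while p < m and left[p] == right[p]: p += 1'  (indices in range since p < m ≤ both lengths)
def pvPfxB (lcs rcs : List Char) (m : Nat) (p : Nat) : Nat :=
  if p < m then
    if lcs.getD p ' ' = rcs.getD p ' ' then pvPfxB lcs rcs m (p + 1) else p
  else p
termination_by m - p

def pvCommonPrefixLen (left right : String) : Nat :=
  pvPfxB left.toList right.toList (min left.toList.length right.toList.length) 0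

-- 'for key, code in [(r[:4], r) for r in right_codes if r]: buckets.setdefault(key, []).append(code)'
def pvBuckets (right_codes : List String) : PySem.Dict String (List String) :=
  ((right_codes.filter (fun r => r ≠ "")).map
      (fun r => (PySem.Str.slice r none (some 4), r))).foldl
    (fun d p => d.modify p.1 [] (· ++ [p.2])) PySem.Dict.empty

-- inner 'for right in buckets.get(left[:4], [])' loop of B
def pvInnerB (left : String) : List String → Bool
  | [] => false
  | r :: rs =>
    if left = r then true
    else if min (PySem.Str.len left) (PySem.Str.len r) < 8 then pvInnerB left rs
    else
      let ld := left.toList.filter PySem.Chars.isdigit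
      let rd := r.toList.filter PySem.Chars.isdigit
      if ld ≠ [] ∧ rd ≠ [] ∧ ld ≠ rd then pvInnerB left rs
      else if 2 < |PySem.Str.len left - PySem.Str.len r| then pvInnerB left rs
      else if ((pvCommonPrefixLen left r : Int)) ≥ max 6 (min (PySem.Str.len left) (PySem.Str.len r) - 2) then true
      else pvInnerB left rs

-- outer 'for left in left_codes' loop of B
def pvOuterB (buckets : PySem.Dict String (List String)) : List String → Bool
  | [] => false
  | l :: ls =>
    if l = "" then pvOuterB buckets ls
    else if pvInnerB l (buckets.getD (PySem.Str.slice l none (some 4)) []) then true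
    else pvOuterB buckets ls

def has_near_specific_model_code_py_alt (left_codes : List String) (right_codes : List String) : Bool :=
  pvOuterB (pvBuckets right_codes) left_codes

-- ===== PRECONDITION & SPEC =====
def Spec_has_near_specific_model_code_py (left_codes : List String) (right_codes : List String) (out : Bool) : Prop := out = has_near_specific_model_code_py_alt left_codes right_codes
instance (left_codes : List String) (right_codes : List String) (out : Bool) : Decidable (Spec_has_near_specific_model_code_py left_codes right_codes out) := by unfold Spec_has_near_specific_model_code_py; infer_instance

-- ===== CLAIM (what is proved, stated in full; the proofs are below) =====
def Claim_equal_has_near_specific_model_code_py : Prop := ∀ (left_codes : List String) (right_codes : List String), Dom_has_near_specific_model_code_py left_codes right_codes → Spec_has_near_specific_model_code_py left_codes right_codes (has_near_specific_model_code_py left_codes right_codes)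

-- ===== LEMMAS AND PROOFS =====

theorem pv_ofList_inj (xs ys : List Char) : (String.ofList xs = String.ofList ys) ↔ xs = ys :=
  ⟨fun h => by simpa using congrArg String.toList h, fun h => by rw [h]⟩

theorem pv_pfxB_eq (lcs rcs : List Char) (p : Nat)
    (h : p ≤ min lcs.length rcs.length) :
    pvPfxB lcs rcs (min lcs.length rcs.length) p
      = p + pvPfxA ((lcs.drop p).zip (rcs.drop p)) := by
  rw [pvPfxB]
  by_cases hp : p < min lcs.length rcs.length
  · have hl : p < lcs.length := lt_of_lt_of_le hp (min_le_left _ _)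
    have hr : p < rcs.length := lt_of_lt_of_le hp (min_le_right _ _)
    have hz : (lcs.drop p).zip (rcs.drop p)
        = (lcs[p], rcs[p]) :: (lcs.drop (p+1)).zip (rcs.drop (p+1)) := by
      rw [List.drop_eq_getElem_cons hl, List.drop_eq_getElem_cons hr, List.zip_cons_cons]
    rw [hz]
    by_cases hc : lcs[p] = rcs[p]
    · rw [pv_pfxB_eq lcs rcs (p + 1) hp]
      simp only [pvPfxA, List.getD_eq_getElem _ _ hl, List.getD_eq_getElem _ _ hr,
        if_pos hp, if_pos hc]
      omega
    · simp only [pvPfxA, List.getD_eq_getElem _ _ hl, List.getD_eq_getElem _ _ hr,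
        if_pos hp, if_neg hc]
      omega
  · have hpe : p = min lcs.length rcs.length := le_antisymm h (Nat.le_of_not_lt hp)
    have hz : (lcs.drop p).zip (rcs.drop p) = [] := by
      rcases le_total lcs.length rcs.length with hm | hm <;>
        simp [hpe, Nat.min_eq_left hm, Nat.min_eq_right hm]
    simp [hp, hz, pvPfxA]
termination_by min lcs.length rcs.length - p

theorem pv_pfx_eq (left r : String) :
    ((pvCommonPrefixLen left r : Int)) = ((pvPfxA (left.toList.zip r.toList) : Int)) := by
  unfold pvCommonPrefixLen
  rw [pv_pfxB_eq left.toList r.toList 0 (Nat.zero_le _)]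
  simp

theorem pv_inner_eq (left : String) (rs : List String) :
    pvInnerA left rs
      = pvInnerB left ((rs.filter (fun r => r ≠ "")).filter
          (fun r => PySem.Str.slice r none (some 4) == PySem.Str.slice left none (some 4))) := by
  induction rs with
  | nil => rfl
  | cons r rs ih =>
    by_cases hre : r = ""
    · simpa [pvInnerA, hre] using ih
    · by_cases hsl : PySem.Str.slice r none (some 4) = PySem.Str.slice left none (some 4)
      · -- r lands in left's bucket
        have hfil : ((r :: rs).filter (fun r => r ≠ "")).filter
            (fun r => PySem.Str.slice r none (some 4) == PySem.Str.slice left none (some 4))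
            = r :: ((rs.filter (fun r => r ≠ "")).filter
                (fun r => PySem.Str.slice r none (some 4) == PySem.Str.slice left none (some 4))) := by
          simp [hre, hsl]
        rw [hfil]
        by_cases hlr : left = r
        · simp [pvInnerA, pvInnerB, hre, hlr]
        · by_cases hmin : min (PySem.Str.len left) (PySem.Str.len r) < 8
          · simp only [pvInnerA, pvInnerB, if_neg hre, if_neg hlr, if_pos hmin]
            · simpa [hre] using ih
          · have hd : (String.ofList (left.toList.filter PySem.Chars.isdigit) ≠ "" ∧
                String.ofList (r.toList.filter PySem.Chars.isdigit) ≠ "" ∧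
                String.ofList (left.toList.filter PySem.Chars.isdigit) ≠
                  String.ofList (r.toList.filter PySem.Chars.isdigit)) ↔
                (left.toList.filter PySem.Chars.isdigit ≠ [] ∧
                 r.toList.filter PySem.Chars.isdigit ≠ [] ∧
                 left.toList.filter PySem.Chars.isdigit ≠ r.toList.filter PySem.Chars.isdigit) := by
              have h1 := pv_ofList_inj (left.toList.filter PySem.Chars.isdigit) []
              have h2 := pv_ofList_inj (r.toList.filter PySem.Chars.isdigit) []
              have h3 := pv_ofList_inj (left.toList.filter PySem.Chars.isdigit)
                (r.toList.filter PySem.Chars.isdigit)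
              constructor
              · rintro ⟨a, b, c⟩
                refine ⟨fun h => a ?_, fun h => b ?_, fun h => c (h3.mpr h)⟩
                · rw [h]
                · rw [h]
              · rintro ⟨a, b, c⟩
                refine ⟨fun h => a (h1.mp h), fun h => b (h2.mp h), fun h => c (h3.mp h)⟩
            simp only [pvInnerA, pvInnerB, if_neg hre, if_neg hlr, if_neg hmin,
              if_neg (show ¬(PySem.Str.slice left none (some 4) ≠ PySem.Str.slice r none (some 4)) from fun h => h hsl.symm)]
            rw [← pv_pfx_eq left r]
            simp only [hd, ih]
      · -- r is not in left's bucket, and A's checks on (left, r) all fail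
        have hfil : ((r :: rs).filter (fun r => r ≠ "")).filter
            (fun r => PySem.Str.slice r none (some 4) == PySem.Str.slice left none (some 4))
            = (rs.filter (fun r => r ≠ "")).filter
                (fun r => PySem.Str.slice r none (some 4) == PySem.Str.slice left none (some 4)) := by
          simp [hre, hsl]
        rw [hfil]
        have hlr : left ≠ r := fun h => hsl (by rw [h])
        by_cases hmin : min (PySem.Str.len left) (PySem.Str.len r) < 8
        · simp only [pvInnerA, if_neg hre, if_neg hlr, if_pos hmin]
          exact ih
        · have hne : PySem.Str.slice left none (some 4) ≠ PySem.Str.slice r none (some 4) :=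
            fun h => hsl h.symm
          simp only [pvInnerA, if_neg hre, if_neg hlr, if_neg hmin, if_pos hne]
          exact ih

theorem pv_bucket_eq (right_codes : List String) (c : String) :
    (pvBuckets right_codes).getD c []
      = (right_codes.filter (fun r => r ≠ "")).filter
          (fun r => PySem.Str.slice r none (some 4) == c) := by
  unfold pvBuckets
  rw [PySem.Dict.getD_foldl_modify_append]
  simp [List.filter_map, Function.comp_def]

theorem pv_outer_eq (right_codes : List String) (lefts : List String) :
    pvOuterA right_codes lefts = pvOuterB (pvBuckets right_codes) lefts := by
  induction lefts with
  | nil => rfl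
  | cons l ls ih =>
    by_cases hle : l = ""
    · simp only [pvOuterA, pvOuterB, if_pos hle, ih]
    · simp only [pvOuterA, pvOuterB, if_neg hle, ih, pv_bucket_eq, pv_inner_eq]

theorem pv_outerA_nil (lefts : List String) : pvOuterA [] lefts = false := by
  induction lefts with
  | nil => rfl
  | cons l ls ih => simp [pvOuterA, pvInnerA, ih]

-- ===== VERDICT (by name: the statement is the Claim_ definition above) =====
theorem has_near_specific_model_code_py_spec : Claim_equal_has_near_specific_model_code_py := by
  intro lefts rights _
  unfold Spec_has_near_specific_model_code_py has_near_specific_model_code_py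
    has_near_specific_model_code_py_alt
  rcases lefts with _ | ⟨l, ls⟩
  · simp [pvOuterB]
  · rcases rights with _ | ⟨r, rs⟩
    · simp [pv_outerA_nil, ← pv_outer_eq]
    · simp [pv_outer_eq]
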